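-- pv_equiv track=rewrite | github.com/Deepstuffx/KASS-Library | app/backend/tools/apply_core_keywords.py | build_keyword_map_from_rules
-- ===== SOURCE A (Python) =====
-- from typing import Dict, List
--
-- def build_keyword_map_from_rules(rules: List[tuple]):
--     # convert to list of (keywords_list, relpath) suitable for refine_sorting
--     # group by folder
--     folder_map = {}
--     for kw, folder in rules:
--         folder_map.setdefault(folder, []).append(kw)
--     keyword_map = []
--     for folder, kws in folder_map.items():
--         # each map entry: (kw list, rel path)
--         keyword_map.append((kws, folder))
--     return keyword_map
-- ===== SOURCE B (Python) =====
-- def build_keyword_map_from_rules(rules):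
--     # Idiomatic staged version: list the distinct folders (first-seen order),
--     # then collect each folder's keywords with a filter pass over rules.
--     folders = list(dict.fromkeys(folder for _, folder in rules))
--     return [([kw for kw, f in rules if f == folder], folder) for folder in folders]
-- ===== Notes on version B (the rewrite author's own statement) =====
-- stated objective: idiomatic
-- what changed: B replaces A's incremental dict-of-lists grouping (and its conversion loop) by two declarative stages: dict.fromkeys to list the distinct folders in first-seen order, then a per-folder filter comprehension over rules to collect each folder's keywords.
import Mathlib
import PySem

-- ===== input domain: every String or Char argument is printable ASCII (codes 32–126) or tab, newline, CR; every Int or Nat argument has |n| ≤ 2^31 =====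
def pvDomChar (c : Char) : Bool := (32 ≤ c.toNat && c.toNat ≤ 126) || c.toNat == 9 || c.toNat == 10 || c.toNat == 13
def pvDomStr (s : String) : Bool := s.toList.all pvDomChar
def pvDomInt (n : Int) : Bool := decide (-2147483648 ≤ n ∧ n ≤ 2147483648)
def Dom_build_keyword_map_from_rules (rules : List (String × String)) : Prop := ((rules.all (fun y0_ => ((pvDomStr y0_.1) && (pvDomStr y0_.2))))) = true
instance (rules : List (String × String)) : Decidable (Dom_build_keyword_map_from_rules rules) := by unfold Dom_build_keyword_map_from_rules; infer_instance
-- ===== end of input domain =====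

-- B replaces A's incremental dict-of-lists grouping by two declarative stages (distinct folders, then a per-folder filter); same values proved.

-- ===== PORT A =====
-- folder_map.setdefault(folder, []).append(kw)  ==  d.modify folder [] (· ++ [kw])
def build_keyword_map_from_rules (rules : List (String × String)) : List (List String × String) :=
  let folder_map : PySem.Dict String (List String) :=
    rules.foldl (fun d p => d.modify p.2 [] (· ++ [p.1])) PySem.Dict.empty
  folder_map.items.foldl (fun km p => km ++ [(p.2, p.1)]) []

-- ===== PORT B =====
-- folders = list(dict.fromkeys(folder for _, folder in rules)); then a filter comprehension per folder
def build_keyword_map_from_rules_alt (rules : List (String × String)) : List (List String × String) :=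
  let folders := PySem.List.dedup (rules.map Prod.snd)
  folders.map (fun folder => ((rules.filter (fun p => p.2 == folder)).map Prod.fst, folder))

-- ===== PRECONDITION & SPEC =====
def Spec_build_keyword_map_from_rules (rules : List (String × String)) (out : List (List String × String)) : Prop := out = build_keyword_map_from_rules_alt rules
instance (rules : List (String × String)) (out : List (List String × String)) : Decidable (Spec_build_keyword_map_from_rules rules out) := by unfold Spec_build_keyword_map_from_rules; infer_instance

-- ===== CLAIM (what is proved, stated in full; the proofs are below) =====
def Claim_equal_build_keyword_map_from_rules : Prop := ∀ (rules : List (String × String)), Dom_build_keyword_map_from_rules rules → Spec_build_keyword_map_from_rules rules (build_keyword_map_from_rules rules)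

-- ===== LEMMAS AND PROOFS =====

-- A's grouping loop, rewritten as the standard key-value loop over the swapped pairs
theorem pvFoldSwap (rules : List (String × String)) :
    rules.foldl (fun d p => d.modify p.2 [] (· ++ [p.1])) PySem.Dict.empty
      = (rules.map Prod.swap).foldl (fun d q => d.modify q.1 [] (· ++ [q.2])) PySem.Dict.empty := by
  rw [List.foldl_map]
  rfl

-- the keys of A's dict are the distinct folders in first-seen order
theorem pvKeys (rules : List (String × String)) :
    (rules.foldl (fun d p => d.modify p.2 [] (· ++ [p.1])) PySem.Dict.empty).keys
      = PySem.List.dedup (rules.map Prod.snd) := by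
  have h := PySem.Dict.keys_foldl_modify_key (l := rules) (key := Prod.snd)
    (d0 := ([] : List String)) (f := fun _ p => (· ++ [p.1])) (d := PySem.Dict.empty)
  simpa [PySem.Dict.keys_empty, PySem.Set.update_nil_left, PySem.List.dedup_eq_ofList] using h

-- the value stored under a folder is the filtered keyword list
theorem pvGetD (rules : List (String × String)) (c : String) :
    (rules.foldl (fun d p => d.modify p.2 [] (· ++ [p.1])) PySem.Dict.empty).getD c []
      = (rules.filter (fun p => p.2 == c)).map Prod.fst := by
  rw [pvFoldSwap]
  rw [PySem.Dict.getD_foldl_modify_append]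
  simp [PySem.Dict.getD_empty, List.filter_map, Function.comp_def, Prod.swap]

-- A's conversion loop is a map
theorem pvConv (l : List (String × List String)) :
    l.foldl (fun km p => km ++ [(p.2, p.1)]) [] = l.map (fun p => (p.2, p.1)) := by
  simpa using PySem.List.foldl_append_singleton_eq_map (fun p : String × List String => (p.2, p.1)) l []

-- ===== VERDICT (by name: the statement is the Claim_ definition above) =====
theorem build_keyword_map_from_rules_spec : Claim_equal_build_keyword_map_from_rules := by
  intro rules _
  unfold Spec_build_keyword_map_from_rules build_keyword_map_from_rules build_keyword_map_from_rules_alt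
  rw [pvConv]
  have hnd : (rules.foldl (fun d p => d.modify p.2 [] (· ++ [p.1])) PySem.Dict.empty).keys.Nodup := by
    rw [pvFoldSwap]
    exact PySem.Dict.nodup_keys_foldl_modify_key _ Prod.fst _ _ _ PySem.Dict.nodup_keys_empty
  rw [PySem.Dict.items_eq_map_keys _ hnd []]
  rw [pvKeys, List.map_map]
  exact List.map_congr_left (fun f _ => by simp [pvGetD rules f])
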